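-- pv_equiv track=rewrite | github.com/anujdhawan/gcp-provisioning | gcp_provisioning.py | create_email_list
-- ===== SOURCE A (Python) =====
-- def create_email_list(emails):
--     email_list = []
--     username = ''
--
--     for character in emails:
--         if character.isalnum() or character == '@' or character == '.':
--             username = username + character
--         elif character == ',' or character == ']':
--             email_list.append(username)
--             username = ''
--     return email_list
-- ===== SOURCE B (Python) =====
-- def create_email_list(emails):
--     # Two-pass: filter to the characters A ever acts on, then recursively
--     # split at each ',' or ']' delimiter; an unterminated tail is dropped.
--     filtered = [c for c in emails if c.isalnum() or c in '@.,]']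
--     return _segments(filtered)
--
-- def _segments(cs):
--     for i, c in enumerate(cs):
--         if c in (',', ']'):
--             return [''.join(cs[:i])] + _segments(cs[i + 1:])
--     return []
-- ===== Notes on version B (the rewrite author's own statement) =====
-- stated objective: alternative
-- what changed: Replaces A's one-pass accumulate/flush state machine with a two-pass pipeline: first filter the string down to the characters A ever acts on, then recursively split that filtered sequence at each delimiter character (the unterminated tail falls away naturally).
import Mathlib
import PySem

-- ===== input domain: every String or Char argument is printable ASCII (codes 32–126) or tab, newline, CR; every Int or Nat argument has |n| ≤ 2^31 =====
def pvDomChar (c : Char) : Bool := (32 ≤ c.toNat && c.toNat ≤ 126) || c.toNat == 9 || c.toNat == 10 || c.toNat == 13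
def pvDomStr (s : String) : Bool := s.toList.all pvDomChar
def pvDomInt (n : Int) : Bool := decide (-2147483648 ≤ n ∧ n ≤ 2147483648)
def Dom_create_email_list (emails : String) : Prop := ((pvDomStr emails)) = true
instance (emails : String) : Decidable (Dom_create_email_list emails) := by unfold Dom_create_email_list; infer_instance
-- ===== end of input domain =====

-- B replaces A's one-pass accumulate/flush state machine with a filter pass followed by a
-- recursive split at each ',' or ']' delimiter (alternative decomposition, same cost).

-- ===== PORT A =====
-- one step of A's for-loop; state = (email_list, username)
def pvStepA (st : List String × String) (c : Char) : List String × String :=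
  if PySem.Chars.isalnum c || c == '@' || c == '.' then (st.1, st.2.push c)
  else if c == ',' || c == ']' then (st.1 ++ [st.2], "")
  else st

def create_email_list (emails : String) : List String :=
  (emails.toList.foldl pvStepA ([], "")).1

-- ===== PORT B =====
-- termination helper for pvSegments (cited by name in decreasing_by)
theorem pvFindIdx?_lt_length {p : Char → Bool} :
    ∀ {cs : List Char} {i : Nat}, cs.findIdx? p = some i → i < cs.length := by
  intro cs
  induction cs with
  | nil => intro i h; simp at h
  | cons c rest ih =>
    intro i h
    rw [List.findIdx?_cons] at h
    split at h
    · simp_all; omega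
    · match hr : rest.findIdx? p with
      | none => rw [hr] at h; simp at h
      | some j =>
        rw [hr] at h
        simp at h
        have := ih hr
        simp
        omega

-- B's _segments: scan for the first ',' or ']' (the enumerate loop with early return),
-- emit the prefix, recurse on the remainder after the delimiter
def pvSegments (cs : List Char) : List String :=
  match h : cs.findIdx? (fun c => c == ',' || c == ']') with
  | some i => String.ofList (cs.take i) :: pvSegments (cs.drop (i + 1))
  | none => []
termination_by cs.length
decreasing_by
  have := pvFindIdx?_lt_length h
  simp
  omega

def create_email_list_alt (emails : String) : List String :=
  pvSegments (emails.toList.filter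
    (fun c => PySem.Chars.isalnum c || c ∈ "@.,]".toList))

-- ===== PRECONDITION & SPEC =====
def Spec_create_email_list (emails : String) (out : List String) : Prop := out = create_email_list_alt emails
instance (emails : String) (out : List String) : Decidable (Spec_create_email_list emails out) := by unfold Spec_create_email_list; infer_instance

-- ===== CLAIM (what is proved, stated in full; the proofs are below) =====
def Claim_equal_create_email_list : Prop := ∀ (emails : String), Dom_create_email_list emails → Spec_create_email_list emails (create_email_list emails)

-- ===== LEMMAS AND PROOFS =====

-- abbreviations used only in the proofs
def pvDelim (c : Char) : Bool := c == ',' || c == ']'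
def pvKeepB (c : Char) : Bool := PySem.Chars.isalnum c || c ∈ "@.,]".toList

theorem pvSegments_nil_of_no_delim {cur : List Char}
    (h : ∀ x ∈ cur, pvDelim x = false) : pvSegments cur = [] := by
  have hn : cur.findIdx? (fun c => c == ',' || c == ']') = none := by
    refine List.findIdx?_eq_none_iff.mpr ?_
    intro x hx
    simpa [pvDelim] using h x hx
  rw [pvSegments.eq_def]
  split
  · next i heq => rw [hn] at heq; cases heq
  · rfl

theorem pvSegments_append_delim {cur rest : List Char} {c : Char}
    (hcur : ∀ x ∈ cur, pvDelim x = false) (hc : pvDelim c = true) :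
    pvSegments (cur ++ c :: rest) = String.ofList cur :: pvSegments rest := by
  have h1 : cur.findIdx? (fun c => c == ',' || c == ']') = none := by
    refine List.findIdx?_eq_none_iff.mpr ?_
    intro x hx
    simpa [pvDelim] using hcur x hx
  have h2 : (cur ++ c :: rest).findIdx? (fun c => c == ',' || c == ']') = some cur.length := by
    rw [List.findIdx?_append, h1, List.findIdx?_cons]
    simp only [pvDelim] at hc
    simp [hc]
  rw [pvSegments.eq_def]
  split
  · next i heq =>
    rw [h2] at heq
    obtain rfl : cur.length = i := Option.some.inj heq
    have ht : (cur ++ c :: rest).take cur.length = cur := by simp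
    have hdr : (cur ++ c :: rest).drop (cur.length + 1) = rest := by
      have : cur ++ c :: rest = (cur ++ [c]) ++ rest := by simp
      rw [this]
      have hl : (cur ++ [c]).length = cur.length + 1 := by simp
      rw [← hl, List.drop_left]
    rw [ht, hdr]
  · next heq => rw [h2] at heq; cases heq

-- the main loop invariant: A's fold from state (acc, u) equals acc ++ B's split of
-- u's pending characters followed by the filtered remainder
theorem pvInvariant : ∀ (cs : List Char) (acc : List String) (u : String),
    (∀ x ∈ u.toList, pvDelim x = false) →
    (cs.foldl pvStepA (acc, u)).1 = acc ++ pvSegments (u.toList ++ cs.filter pvKeepB) := by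
  intro cs
  induction cs with
  | nil =>
    intro acc u hu
    simp [pvSegments_nil_of_no_delim hu]
  | cons c rest ih =>
    intro acc u hu
    simp only [List.foldl_cons]
    by_cases hk : (PySem.Chars.isalnum c || c == '@' || c == '.') = true
    · -- kept character: pushed onto username; it is not a delimiter
      have hnd : pvDelim c = false := by
        simp only [pvDelim, Bool.or_eq_false_iff]
        constructor
        · by_contra h
          simp at h
          subst h
          revert hk
          decide
        · by_contra h
          simp at h
          subst h
          revert hk
          decide
      have hp : pvKeepB c = true := by
        simp only [pvKeepB]
        rcases Bool.or_eq_true_iff.mp hk with h | h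
        · rcases Bool.or_eq_true_iff.mp h with h | h
          · simp [h]
          · simp at h; subst h; decide
        · simp at h; subst h; decide
      have hu' : ∀ x ∈ (u.push c).toList, pvDelim x = false := by
        intro x hx
        simp at hx
        rcases hx with hx | hx
        · exact hu x hx
        · subst hx; exact hnd
      rw [pvStepA, if_pos hk, ih _ _ hu']
      simp [hp]
    · by_cases hd : (c == ',' || c == ']') = true
      · -- delimiter: flush username
        have hp : pvKeepB c = true := by
          simp only [pvKeepB]
          rcases Bool.or_eq_true_iff.mp hd with h | h <;> (simp at h; subst h; decide)
        have hu'' : ∀ x ∈ ("" : String).toList, pvDelim x = false := by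
          intro x hx; simp at hx
        rw [pvStepA, if_neg hk, if_pos hd, ih _ _ hu'']
        rw [List.filter_cons, if_pos hp]
        rw [pvSegments_append_delim hu hd]
        simp
      · -- ignored character
        have hp : pvKeepB c = false := by
          have hlist : ("@.,]".toList) = ['@', '.', ',', ']'] := by decide
          simp only [Bool.or_eq_true, beq_iff_eq, not_or] at hk hd
          simp [pvKeepB, hlist, hk.1]
          exact ⟨hk.2, hd.1, hd.2⟩
        rw [pvStepA, if_neg hk, if_neg hd, ih _ _ hu]
        simp [hp]

-- ===== VERDICT (by name: the statement is the Claim_ definition above) =====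
theorem create_email_list_spec : Claim_equal_create_email_list := by
  intro emails _
  unfold Spec_create_email_list create_email_list create_email_list_alt
  rw [pvInvariant emails.toList [] "" (by intro x hx; simp at hx)]
  rfl
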